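-- pv_equiv track=rewrite | github.com/IISkylineIII/Rosalind | BA11C.Py | build_spectrum_graph
-- ===== SOURCE A (Python) =====
-- mass_table = {
--     'G': 57, 'A': 71, 'S': 87, 'P': 97, 'V': 99,
--     'T': 101, 'C': 103, 'I': 113, 'L': 113, 'N': 114,
--     'D': 115, 'K': 128, 'Q': 128, 'E': 129, 'M': 131,
--     'H': 137, 'F': 147, 'R': 156, 'Y': 163, 'W': 186
-- }
--
-- def build_spectrum_graph(spectrum):
--     spectrum = [0] + sorted(spectrum)  # Garantir que 0 esteja no início
--     edges = []
--     for i in range(len(spectrum)):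
--         for j in range(i+1, len(spectrum)):
--             diff = spectrum[j] - spectrum[i]
--             # Verifica se essa diferença é massa de algum aminoácido
--             for aa, mass in mass_table.items():
--                 if mass == diff:
--                     edges.append(f"{spectrum[i]}->{spectrum[j]}:{aa}")
--                     break
--     return edges
-- ===== SOURCE B (Python) =====
-- # B: counting re-implementation — O(n log n + 18 n) instead of A's O(n^2 * 20):
-- # count multiplicities once, then for each node test the 18 distinct amino-acid
-- # masses in ascending order (first-in-table amino acid per mass precomputed).
-- _MASS_AA = [
--     (57, 'G'), (71, 'A'), (87, 'S'), (97, 'P'), (99, 'V'), (101, 'T'),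
--     (103, 'C'), (113, 'I'), (114, 'N'), (115, 'D'), (128, 'K'), (129, 'E'),
--     (131, 'M'), (137, 'H'), (147, 'F'), (156, 'R'), (163, 'Y'), (186, 'W'),
-- ]
--
-- def build_spectrum_graph(spectrum):
--     counts = {}
--     for v in spectrum:
--         counts[v] = counts.get(v, 0) + 1
--     edges = []
--     for x in [0] + sorted(spectrum):
--         for mass, aa in _MASS_AA:
--             c = counts.get(x + mass, 0)
--             if c:
--                 edges += [f"{x}->{x + mass}:{aa}"] * c
--     return edges
-- ===== Notes on version B (the rewrite author's own statement) =====
-- stated objective: faster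
-- what changed: Replaces the O(n^2) all-pairs scan with an inner 20-entry table walk by a multiplicity counter built once plus, per node, a test of the 18 distinct amino-acid masses in ascending order (tie-break amino acid per mass precomputed), emitting each edge with its target's multiplicity.
import Mathlib
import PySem

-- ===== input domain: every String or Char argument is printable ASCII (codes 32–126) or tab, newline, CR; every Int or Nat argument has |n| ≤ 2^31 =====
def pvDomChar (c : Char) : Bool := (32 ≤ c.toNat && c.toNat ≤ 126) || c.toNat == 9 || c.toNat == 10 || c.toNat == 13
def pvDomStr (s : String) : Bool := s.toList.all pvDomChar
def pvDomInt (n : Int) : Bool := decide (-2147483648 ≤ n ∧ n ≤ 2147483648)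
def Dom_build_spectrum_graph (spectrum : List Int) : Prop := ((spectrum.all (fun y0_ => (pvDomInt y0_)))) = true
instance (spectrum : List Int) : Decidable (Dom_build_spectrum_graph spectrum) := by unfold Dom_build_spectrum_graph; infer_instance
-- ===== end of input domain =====

-- B replaces A's O(n^2) pair scan (with an inner 20-entry table walk) by a multiplicity
-- counter built once plus, per node, a test of the 18 distinct amino-acid masses in
-- ascending order; proved to return exactly A's edge list.

-- ===== PORT A =====
def mass_table : PySem.Dict String Int :=
  PySem.Dict.ofList [("G",57),("A",71),("S",87),("P",97),("V",99),("T",101),("C",103),("I",113),("L",113),("N",114),("D",115),("K",128),("Q",128),("E",129),("M",131),("H",137),("F",147),("R",156),("Y",163),("W",186)]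

def build_spectrum_graph (spectrum : List Int) : List String :=
  let s : List Int := 0 :: PySem.List.sorted spectrum (fun x => x) false
  -- indices from range(...) are always in range, so s[i] is exactly PySem.List.pyGetD s i 0 here
  (PySem.List.pyRange 0 (s.length : Int) 1).foldl (fun edges i =>
    (PySem.List.pyRange (i + 1) (s.length : Int) 1).foldl (fun edges j =>
      let diff := PySem.List.pyGetD s j 0 - PySem.List.pyGetD s i 0
      -- 'for aa, mass in mass_table.items(): if mass == diff: append; break' = first matching item
      match mass_table.items.find? (fun p => p.2 == diff) with
      | some p => edges ++ [PySem.Int.toStr (PySem.List.pyGetD s i 0) ++ "->" ++ PySem.Int.toStr (PySem.List.pyGetD s j 0) ++ ":" ++ p.1]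
      | none => edges) edges) []

-- ===== PORT B =====
def massAA : List (Int × String) :=
  [(57,"G"),(71,"A"),(87,"S"),(97,"P"),(99,"V"),(101,"T"),(103,"C"),(113,"I"),(114,"N"),(115,"D"),(128,"K"),(129,"E"),(131,"M"),(137,"H"),(147,"F"),(156,"R"),(163,"Y"),(186,"W")]

def build_spectrum_graph_alt (spectrum : List Int) : List String :=
  let counts : PySem.Dict Int Int :=
    spectrum.foldl (fun d v => d.insert v (d.getD v 0 + 1)) PySem.Dict.empty
  (0 :: PySem.List.sorted spectrum (fun x => x) false).foldl (fun edges x =>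
    massAA.foldl (fun edges p =>
      let c := counts.getD (x + p.1) 0
      if c ≠ 0 then
        edges ++ PySem.List.pyRepeat [PySem.Int.toStr x ++ "->" ++ PySem.Int.toStr (x + p.1) ++ ":" ++ p.2] c
      else edges) edges) []

-- ===== PRECONDITION & SPEC =====
def Spec_build_spectrum_graph (spectrum : List Int) (out : List String) : Prop := out = build_spectrum_graph_alt spectrum
instance (spectrum : List Int) (out : List String) : Decidable (Spec_build_spectrum_graph spectrum out) := by unfold Spec_build_spectrum_graph; infer_instance

-- ===== CLAIM (what is proved, stated in full; the proofs are below) =====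
def Claim_equal_build_spectrum_graph : Prop := ∀ (spectrum : List Int), Dom_build_spectrum_graph spectrum → Spec_build_spectrum_graph spectrum (build_spectrum_graph spectrum)

-- ===== LEMMAS AND PROOFS =====

/-- The edge string both programs build. -/
def edgeS (x y : Int) (aa : String) : String :=
  PySem.Int.toStr x ++ "->" ++ PySem.Int.toStr y ++ ":" ++ aa

/-- A's inner-loop body, abstracted over the two peak values. -/
def astep (x : Int) (e : List String) (y : Int) : List String :=
  match mass_table.items.find? (fun p => p.2 == y - x) with
  | some p => e ++ [edgeS x y p.1]
  | none => e

/-- A's double loop, phrased structurally over suffixes. -/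
def sufLoop : List Int → List String → List String
  | [], e => e
  | x :: t, e => sufLoop t (t.foldl (astep x) e)

/-- Edges B emits for one source node `x`, counting targets in `S`. -/
def bgroup (S : List Int) (x : Int) : List String :=
  massAA.flatMap (fun p => List.replicate (S.count (x + p.1)) (edgeS x (x + p.1) p.2))

/-- B-side lookup result for a mass difference. -/
def findB (d : Int) : Option (Int × String) := massAA.find? (fun p => p.1 == d)

lemma lookup_corr (d : Int) :
    mass_table.items.find? (fun p => p.2 == d) = (findB d).map (fun p => (p.2, p.1)) := by
  by_cases h1 : d = 57; · subst h1; decide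
  by_cases h2 : d = 71; · subst h2; decide
  by_cases h3 : d = 87; · subst h3; decide
  by_cases h4 : d = 97; · subst h4; decide
  by_cases h5 : d = 99; · subst h5; decide
  by_cases h6 : d = 101; · subst h6; decide
  by_cases h7 : d = 103; · subst h7; decide
  by_cases h8 : d = 113; · subst h8; decide
  by_cases h9 : d = 114; · subst h9; decide
  by_cases h10 : d = 115; · subst h10; decide
  by_cases h11 : d = 128; · subst h11; decide
  by_cases h12 : d = 129; · subst h12; decide
  by_cases h13 : d = 131; · subst h13; decide
  by_cases h14 : d = 137; · subst h14; decide
  by_cases h15 : d = 147; · subst h15; decide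
  by_cases h16 : d = 156; · subst h16; decide
  by_cases h17 : d = 163; · subst h17; decide
  by_cases h18 : d = 186; · subst h18; decide
  have hit : mass_table.items = [("G",57),("A",71),("S",87),("P",97),("V",99),("T",101),("C",103),("I",113),("L",113),("N",114),("D",115),("K",128),("Q",128),("E",129),("M",131),("H",137),("F",147),("R",156),("Y",163),("W",186)] := by decide
  simp [hit, findB, massAA, List.find?, beq_eq_false_iff_ne.mpr (Ne.symm h1), beq_eq_false_iff_ne.mpr (Ne.symm h2), beq_eq_false_iff_ne.mpr (Ne.symm h3), beq_eq_false_iff_ne.mpr (Ne.symm h4), beq_eq_false_iff_ne.mpr (Ne.symm h5), beq_eq_false_iff_ne.mpr (Ne.symm h6), beq_eq_false_iff_ne.mpr (Ne.symm h7), beq_eq_false_iff_ne.mpr (Ne.symm h8), beq_eq_false_iff_ne.mpr (Ne.symm h9), beq_eq_false_iff_ne.mpr (Ne.symm h10), beq_eq_false_iff_ne.mpr (Ne.symm h11), beq_eq_false_iff_ne.mpr (Ne.symm h12), beq_eq_false_iff_ne.mpr (Ne.symm h13), beq_eq_false_iff_ne.mpr (Ne.symm h14), beq_eq_false_iff_ne.mpr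 (Ne.symm h15), beq_eq_false_iff_ne.mpr (Ne.symm h16), beq_eq_false_iff_ne.mpr (Ne.symm h17), beq_eq_false_iff_ne.mpr (Ne.symm h18)]

lemma massAA_pairwise : massAA.Pairwise (fun p q => p.1 < q.1) := by decide

lemma massAA_pos : ∀ p ∈ massAA, 0 < p.1 := by decide

lemma massAA_inj : ∀ q ∈ massAA, ∀ p ∈ massAA, q.1 = p.1 → q = p := by decide

lemma flatMap_split (ms : List (Int × String)) (f1 f2 : Int × String → List String)
    (b : String) (p0 : Int × String)
    (hms : ms.Pairwise (fun p q => p.1 < q.1)) (hmem : p0 ∈ ms)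
    (hlt : ∀ q ∈ ms, q.1 < p0.1 → f1 q = [] ∧ f2 q = [])
    (hpiv : ∀ q ∈ ms, q.1 = p0.1 → f1 q = b :: f2 q)
    (hgt : ∀ q ∈ ms, p0.1 < q.1 → f1 q = f2 q) :
    ms.flatMap f1 = b :: ms.flatMap f2 := by
  induction ms with
  | nil => simp at hmem
  | cons a ms ih =>
    rcases List.pairwise_cons.mp hms with ⟨ha, hms'⟩
    rcases lt_trichotomy a.1 p0.1 with hc | hc | hc
    · have hf1 := hlt a (List.mem_cons_self) hc
      have hp0 : p0 ∈ ms := by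
        rcases List.mem_cons.mp hmem with rfl | h
        · exact absurd hc (lt_irrefl _)
        · exact h
      simp only [List.flatMap_cons, hf1.1, hf1.2, List.nil_append]
      exact ih hms' hp0 (fun q hq => hlt q (List.mem_cons_of_mem _ hq))
        (fun q hq => hpiv q (List.mem_cons_of_mem _ hq))
        (fun q hq => hgt q (List.mem_cons_of_mem _ hq))
    · have hfa := hpiv a (List.mem_cons_self) hc
      have htail : ms.flatMap f1 = ms.flatMap f2 := by
        rw [List.flatMap_def, List.flatMap_def,
          List.map_congr_left (fun q hq => hgt q (List.mem_cons_of_mem _ hq) (hc ▸ ha q hq))]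
      simp [List.flatMap_cons, hfa, htail]
    · exfalso
      rcases List.mem_cons.mp hmem with rfl | h
      · exact lt_irrefl _ hc
      · exact absurd (ha p0 h) (lt_asymm hc)


lemma astep_eq (x : Int) :
    astep x = fun e y => e ++ ((findB (y - x)).map (fun p => edgeS x y p.2)).toList := by
  funext e y
  unfold astep
  rw [lookup_corr]
  cases findB (y - x) <;> simp

lemma foldl_astep (x : Int) (t : List Int) (e : List String) :
    t.foldl (astep x) e
      = e ++ t.flatMap (fun y => ((findB (y - x)).map (fun p => edgeS x y p.2)).toList) := by
  rw [astep_eq, PySem.List.foldl_append_eq_flatMap]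

lemma group (x : Int) : ∀ (t : List Int), t.Pairwise (· ≤ ·) →
    t.flatMap (fun y => ((findB (y - x)).map (fun p => edgeS x y p.2)).toList) = bgroup t x := by
  intro t ht
  induction t with
  | nil => simp [bgroup]
  | cons v t ih =>
    rcases List.pairwise_cons.mp ht with ⟨hv, ht'⟩
    have ihe := ih ht'
    cases hf : findB (v - x) with
    | none =>
      have hnone : ∀ p ∈ massAA, x + p.1 ≠ v := by
        intro p hp he
        have := List.find?_eq_none.mp hf p hp
        simp [beq_iff_eq] at this
        exact this (by omega)
      have hcnt : bgroup (v :: t) x = bgroup t x := by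
        unfold bgroup
        rw [List.flatMap_def, List.flatMap_def, List.map_congr_left]
        intro p hp
        rw [List.count_cons_of_ne (by exact fun h => hnone p hp h.symm)]
      rw [List.flatMap_cons, hf, hcnt, ← ihe]
      simp
    | some p =>
      have hpm : p ∈ massAA := List.mem_of_find?_eq_some hf
      have hpd : p.1 = v - x := by
        have := List.find?_some hf
        simpa [beq_iff_eq] using this
      have hvx : v = x + p.1 := by omega
      rw [List.flatMap_cons, hf, ihe]
      simp only [Option.map_some, Option.toList_some, List.singleton_append]
      refine (flatMap_split massAA _ _ (edgeS x v p.2) p massAA_pairwise hpm ?_ ?_ ?_).symm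
      · intro q hq hql
        have h1 : (v :: t).count (x + q.1) = 0 := by
          rw [List.count_eq_zero]
          intro hmem
          rcases List.mem_cons.mp hmem with h | h
          · omega
          · exact absurd (hv _ h) (by omega)
        have h2 : t.count (x + q.1) = 0 := by
          rw [List.count_eq_zero]
          intro hmem
          exact absurd (hv _ hmem) (by omega)
        exact ⟨by simp [h1], by simp [h2]⟩
      · intro q hq hqe
        have : q = p := massAA_inj q hq p hpm hqe
        subst this
        rw [← hvx, List.count_cons_self]
        simp [List.replicate_succ]
      · intro q hq hqg
        have : x + q.1 ≠ v := by omega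
        rw [List.count_cons_of_ne (fun h => this h.symm)]

lemma count_drop_eq (S : List Int) (hS : S.Pairwise (· ≤ ·)) (k : Nat) (hk : k < S.length)
    (w : Int) (hw : S[k] < w) : (S.drop (k + 1)).count w = S.count w := by
  conv_rhs => rw [← List.take_append_drop (k + 1) S]
  rw [List.count_append]
  have h0 : (S.take (k + 1)).count w = 0 := by
    rw [List.count_eq_zero]
    intro hmem
    obtain ⟨i, hi, hEq⟩ := List.getElem_of_mem hmem
    rw [List.getElem_take] at hEq
    have hik : i < k + 1 := by
      have := hi; simp [List.length_take] at this; omega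
    have hle : S[i] ≤ S[k] := by
      rcases Nat.lt_or_ge i k with h | h
      · exact List.pairwise_iff_getElem.mp hS i k (by omega) hk h
      · have : i = k := by omega
        subst this; exact le_refl _
    omega
  omega

lemma bgroup_drop (S : List Int) (hS : S.Pairwise (· ≤ ·)) (k : Nat) (hk : k < S.length) :
    bgroup (S.drop (k + 1)) S[k] = bgroup S S[k] := by
  unfold bgroup
  rw [List.flatMap_def, List.flatMap_def, List.map_congr_left]
  intro p hp
  rw [count_drop_eq S hS k hk _ (by have := massAA_pos p hp; omega)]

lemma tail_loop (S : List Int) (hS : S.Pairwise (· ≤ ·)) :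
    ∀ (n k : Nat) (e : List String), S.length - k = n →
      sufLoop (S.drop k) e = (S.drop k).foldl (fun e x => e ++ bgroup S x) e := by
  intro n
  induction n with
  | zero =>
    intro k e h
    have hnil : S.drop k = [] := List.drop_eq_nil_iff.mpr (by omega)
    rw [hnil]
    rfl
  | succ n ih =>
    intro k e h
    have hk : k < S.length := by omega
    have hd : S.drop k = S[k] :: S.drop (k + 1) := List.drop_eq_getElem_cons hk
    rw [hd]
    simp only [sufLoop, List.foldl_cons]
    rw [foldl_astep, group _ _ (hS.drop), bgroup_drop S hS k hk]
    exact ih (k + 1) (e ++ bgroup S S[k]) (by omega)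

lemma Aloop_eq (s : List Int) :
    ∀ (n k : Nat) (e : List String), s.length - k = n →
      (PySem.List.pyRange (k : Int) (s.length : Int) 1).foldl (fun edges i =>
        (PySem.List.pyRange (i + 1) (s.length : Int) 1).foldl (fun edges j =>
          astep (PySem.List.pyGetD s i 0) edges (PySem.List.pyGetD s j 0)) edges) e
      = sufLoop (s.drop k) e := by
  intro n
  induction n with
  | zero =>
    intro k e h
    have hnil : s.drop k = [] := List.drop_eq_nil_iff.mpr (by omega)
    rw [PySem.List.pyRange_one_eq_nil (by omega), hnil]
    rfl
  | succ n ih =>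
    intro k e h
    have hk : k < s.length := by omega
    have hd : s.drop k = s[k] :: s.drop (k + 1) := List.drop_eq_getElem_cons hk
    rw [PySem.List.pyRange_one_cons (by omega), List.foldl_cons]
    have hcast : (k : Int) + 1 = ((k + 1 : Nat) : Int) := by push_cast; ring
    have hget : PySem.List.pyGetD s (k : Int) 0 = s[k] := by
      rw [PySem.List.pyGetD_natCast, List.getD_eq_getElem s 0 hk]
    rw [hcast, PySem.List.foldl_pyRange_pyGetD' s 0 (astep (PySem.List.pyGetD s ((k : Nat) : Int) 0)) e (by omega)]
    rw [Int.toNat_natCast, hget, hd]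
    simp only [sufLoop]
    exact ih (k + 1) _ (by omega)

lemma alt_eq (spectrum : List Int) :
    build_spectrum_graph_alt spectrum
      = (0 :: PySem.List.sorted spectrum (fun x => x) false).foldl
          (fun e x => e ++ bgroup (PySem.List.sorted spectrum (fun x => x) false) x) [] := by
  simp only [build_spectrum_graph_alt]
  rw [PySem.Dict.foldl_insert_getD_add_one_eq_counter]
  have hbody : ∀ (x : Int) (edges : List String),
      massAA.foldl (fun edges p =>
        let c := (PySem.Dict.counter spectrum).getD (x + p.1) 0
        if c ≠ 0 then
          edges ++ PySem.List.pyRepeat [PySem.Int.toStr x ++ "->" ++ PySem.Int.toStr (x + p.1) ++ ":" ++ p.2] c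
        else edges) edges
      = edges ++ bgroup (PySem.List.sorted spectrum (fun x => x) false) x := by
    intro x edges
    have hfun : (fun (edges : List String) (p : Int × String) =>
        let c := (PySem.Dict.counter spectrum).getD (x + p.1) 0
        if c ≠ 0 then
          edges ++ PySem.List.pyRepeat [PySem.Int.toStr x ++ "->" ++ PySem.Int.toStr (x + p.1) ++ ":" ++ p.2] c
        else edges)
        = fun edges p => edges ++ List.replicate (spectrum.count (x + p.1)) (edgeS x (x + p.1) p.2) := by
      funext edges p
      simp only [PySem.Dict.getD_counter, PySem.List.pyRepeat_singleton, edgeS]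
      split_ifs with h
      · norm_num
      · simp only [ne_eq, Decidable.not_not] at h
        have : spectrum.count (x + p.1) = 0 := by exact_mod_cast h
        simp [this]
    rw [hfun, PySem.List.foldl_append_eq_flatMap]
    unfold bgroup
    congr 1
    apply List.flatMap_congr
    intro p hp
    rw [((PySem.List.sorted_perm spectrum (fun x => x) false).count_eq (x + p.1)).symm]
  apply PySem.List.foldl_congr_mem
  intro edges x _
  exact hbody x edges

-- ===== VERDICT (by name: the statement is the Claim_ definition above) =====
theorem build_spectrum_graph_spec : Claim_equal_build_spectrum_graph := by
  intro spectrum _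
  unfold Spec_build_spectrum_graph
  have hS : (PySem.List.sorted spectrum (fun x => x) false).Pairwise (· ≤ ·) :=
    PySem.List.sorted_pairwise spectrum (fun x => x)
  set S := PySem.List.sorted spectrum (fun x => x) false with hSdef
  have hA : build_spectrum_graph spectrum = sufLoop (0 :: S) [] := by
    have := Aloop_eq (0 :: S) (0 :: S).length 0 [] (by omega)
    simpa [build_spectrum_graph, hSdef] using this
  rw [hA, alt_eq spectrum, ← hSdef]
  show sufLoop S (S.foldl (astep 0) []) = _
  rw [foldl_astep, group 0 S hS]
  have := tail_loop S hS S.length 0 ([] ++ bgroup S 0) (by omega)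
  simp only [List.drop_zero] at this
  rw [this]
  simp [List.foldl_cons]
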